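-- pv_equiv track=rewrite | github.com/theparisa/Data-structure-and-Algorithms-Course | P2_810101509/P4.py | answer_shoe_queries
-- ===== SOURCE A (Python) =====
-- def answer_shoe_queries(shoes, path_data):
--     sorted_shoes = sorted(shoes, key=lambda t: t[0])
--
--     results = [0] * len(shoes)
--     path_idx = 0
--
--     for shoe_d, shoe_s, original_idx in sorted_shoes:
--         while path_idx < len(path_data) and path_data[path_idx][0] <= shoe_d:
--             path_idx += 1
--
--         can_use_shoe = False
--         if path_idx >= len(path_data):
--             can_use_shoe = True
--         elif shoe_s > path_data[path_idx][1]: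
--             can_use_shoe = True
--
--         if can_use_shoe and shoe_s > 0:
--             results[original_idx] = 1
--
--     return results
-- ===== SOURCE B (Python) =====
-- def answer_shoe_queries(shoes, path_data):
--     results = [0] * len(shoes)
--     for shoe_d, shoe_s, original_idx in shoes:
--         blocker = next((p for p in path_data if p[0] > shoe_d), None)
--         if shoe_s > 0 and (blocker is None or shoe_s > blocker[1]):
--             results[original_idx] = 1
--     return results
-- ===== Notes on version B (the rewrite author's own statement) =====
-- stated objective: simpler
-- what changed: Drops the sort and the shared two-pointer sweep: B walks shoes in original order and, per shoe, takes the first path entry whose first coordinate exceeds the shoe's d (correct because every entry the sweep's pointer skips is <= the current d).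
import Mathlib
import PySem

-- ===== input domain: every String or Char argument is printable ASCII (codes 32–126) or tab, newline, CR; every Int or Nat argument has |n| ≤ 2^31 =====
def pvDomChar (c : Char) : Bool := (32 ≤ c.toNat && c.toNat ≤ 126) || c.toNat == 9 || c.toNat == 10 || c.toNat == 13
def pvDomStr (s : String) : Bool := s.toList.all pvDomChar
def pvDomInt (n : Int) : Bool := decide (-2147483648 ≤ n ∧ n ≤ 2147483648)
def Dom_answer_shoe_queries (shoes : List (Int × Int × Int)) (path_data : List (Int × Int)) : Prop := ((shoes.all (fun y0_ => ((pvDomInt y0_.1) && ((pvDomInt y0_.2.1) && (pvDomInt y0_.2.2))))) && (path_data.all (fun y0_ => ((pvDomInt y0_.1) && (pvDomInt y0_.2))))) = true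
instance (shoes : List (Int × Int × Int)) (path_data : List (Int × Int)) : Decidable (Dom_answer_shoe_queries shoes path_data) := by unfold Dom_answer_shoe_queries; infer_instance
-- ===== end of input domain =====

-- B drops A's sort and shared two-pointer sweep: per shoe it scans path_data for the first
-- entry with first coordinate > d (objective: simpler; return-value equivalence only).

-- ===== PORT A =====
-- the 'while path_idx < len(path_data) and path_data[path_idx][0] <= shoe_d: path_idx += 1' loop
def aAdvance (path : List (Int × Int)) (d : Int) (p : Nat) : Nat :=
  if p < path.length ∧ (path.getD p (0, 0)).1 ≤ d then aAdvance path d (p + 1) else p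
termination_by path.length - p
decreasing_by omega

-- the body of A's 'for shoe_d, shoe_s, original_idx in sorted_shoes' loop; state = (results, path_idx)
def aStep (path : List (Int × Int)) (st : List Int × Nat) (t : Int × Int × Int) : List Int × Nat :=
  let p := aAdvance path t.1 st.2
  let can_use : Bool :=
    if p ≥ path.length then true
    else decide (t.2.1 > (path.getD p (0, 0)).2)
  let res := if can_use && decide (t.2.1 > 0) then PySem.List.pySetD st.1 t.2.2 1 else st.1
  (res, p)

def answer_shoe_queries (shoes : List (Int × Int × Int)) (path_data : List (Int × Int)) : List Int :=
  let sorted_shoes := PySem.List.sorted shoes (fun t => t.1) false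
  let results : List Int := List.replicate shoes.length 0
  (sorted_shoes.foldl (aStep path_data) (results, 0)).1

-- ===== PORT B =====
-- body of B's 'for shoe_d, shoe_s, original_idx in shoes' loop; 'next(… if p[0] > shoe_d, None)' is find?
def bStep (path : List (Int × Int)) (res : List Int) (t : Int × Int × Int) : List Int :=
  let blocker := path.find? (fun e => decide (t.1 < e.1))
  if decide (t.2.1 > 0) && (match blocker with
      | none => true
      | some e => decide (t.2.1 > e.2)) then PySem.List.pySetD res t.2.2 1 else res

def answer_shoe_queries_alt (shoes : List (Int × Int × Int)) (path_data : List (Int × Int)) : List Int :=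
  shoes.foldl (bStep path_data) (List.replicate shoes.length 0)

-- ===== PRECONDITION & SPEC =====
-- Pre_ excludes exactly the inputs where Python raises IndexError: some usable shoe (s > 0 and not
-- stopped by its first path entry with first coordinate > d) has an index outside [-len(shoes), len(shoes)),
-- so the write results[original_idx] = 1 fires out of range.
def Pre_answer_shoe_queries (shoes : List (Int × Int × Int)) (path_data : List (Int × Int)) : Prop :=
  ∀ t ∈ shoes, t.2.1 ≤ 0 ∨ PySem.Raise.InRange shoes.length t.2.2 ∨
    ((path_data.find? (fun e => decide (t.1 < e.1))).any (fun e => decide (t.2.1 ≤ e.2)) = true)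
instance (shoes : List (Int × Int × Int)) (path_data : List (Int × Int)) : Decidable (Pre_answer_shoe_queries shoes path_data) := by unfold Pre_answer_shoe_queries; infer_instance

def pvWitness_answer_shoe_queries : (List (Int × Int × Int)) × (List (Int × Int)) :=
  ([(3, 2, 0), (1, 5, 1), (2, -1, 2)], [(2, 4), (1, 1)])

def Spec_answer_shoe_queries (shoes : List (Int × Int × Int)) (path_data : List (Int × Int)) (out : List Int) : Prop := out = answer_shoe_queries_alt shoes path_data
instance (shoes : List (Int × Int × Int)) (path_data : List (Int × Int)) (out : List Int) : Decidable (Spec_answer_shoe_queries shoes path_data out) := by unfold Spec_answer_shoe_queries; infer_instance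

-- ===== CLAIM (what is proved, stated in full; the proofs are below) =====
def Claim_equal_answer_shoe_queries : Prop := ∀ (shoes : List (Int × Int × Int)) (path_data : List (Int × Int)), Dom_answer_shoe_queries shoes path_data → Pre_answer_shoe_queries shoes path_data → Spec_answer_shoe_queries shoes path_data (answer_shoe_queries shoes path_data)

-- ===== LEMMAS AND PROOFS =====

lemma aAdvance_le (path : List (Int × Int)) (d : Int) (p : Nat) (h : p ≤ path.length) :
    aAdvance path d p ≤ path.length := by
  fun_induction aAdvance path d p with
  | case1 p hc ih => exact ih (by omega)
  | case2 p hc => exact h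

lemma aAdvance_skipped (path : List (Int × Int)) (d : Int) (p : Nat) :
    ∀ k, p ≤ k → k < aAdvance path d p → (path.getD k (0, 0)).1 ≤ d := by
  fun_induction aAdvance path d p with
  | case1 p hc ih =>
    intro k hk1 hk2
    rcases Nat.eq_or_lt_of_le hk1 with h | h
    · subst h; exact hc.2
    · exact ih k h hk2
  | case2 p hc => intro k hk1 hk2; omega

lemma find?_first (pred : (Int × Int) → Bool) :
    ∀ (l : List (Int × Int)) (p : Nat), p < l.length →
      (∀ k, k < p → pred (l.getD k (0, 0)) = false) → pred (l.getD p (0, 0)) = true →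
      l.find? pred = some (l.getD p (0, 0)) := by
  intro l
  induction l with
  | nil => intro p h; simp at h
  | cons a t ih =>
    intro p hp hfail hsucc
    cases p with
    | zero => simp only [List.getD_cons_zero] at hsucc ⊢; simp [List.find?, hsucc]
    | succ q =>
      have ha : pred a = false := by
        have := hfail 0 (Nat.succ_pos q); simpa using this
      simp only [List.getD_cons_succ] at hsucc ⊢
      rw [List.find?_cons_of_neg (by simp [ha])]
      exact ih q (by simpa using hp) (fun k hk => by
        have := hfail (k + 1) (by omega); simpa using this) hsucc

lemma aAdvance_find (path : List (Int × Int)) (d : Int) (p : Nat)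
    (hlen : p ≤ path.length)
    (h : ∀ k, k < p → (path.getD k (0, 0)).1 ≤ d) :
    path.find? (fun e => decide (d < e.1)) =
      if aAdvance path d p < path.length then some (path.getD (aAdvance path d p) (0, 0))
      else none := by
  fun_induction aAdvance path d p with
  | case1 p hc ih =>
    refine ih (by omega) ?_
    intro k hk
    rcases Nat.lt_succ_iff_lt_or_eq.mp hk with h' | h'
    · exact h k h'
    · subst h'; exact hc.2
  | case2 p hc =>
    by_cases hp : p < path.length
    · have hgt : d < (path.getD p (0, 0)).1 := by
        rcases not_and_or.mp hc with h' | h'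
        · omega
        · omega
      rw [if_pos hp]
      exact find?_first _ path p hp
        (fun k hk => by simp only [decide_eq_false_iff_not, not_lt]; exact h k hk) (by simpa)
    · rw [if_neg hp]
      rw [List.find?_eq_none]
      intro x hx
      obtain ⟨k, hk, rfl⟩ := List.mem_iff_getElem.mp hx
      have : path.getD k (0, 0) = path[k] := List.getD_eq_getElem path (0,0) hk
      have hle := h k (by omega)
      rw [this] at hle
      simpa using hle

-- one A-step equals one B-step (given the pointer invariant), and the invariant is preserved
lemma loop_eq (path : List (Int × Int)) :
    ∀ (ss : List (Int × Int × Int)) (res : List Int) (p : Nat),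
      p ≤ path.length →
      ss.Pairwise (fun a b => a.1 ≤ b.1) →
      (∀ t ∈ ss, ∀ k, k < p → (path.getD k (0, 0)).1 ≤ t.1) →
      (ss.foldl (aStep path) (res, p)).1 = ss.foldl (bStep path) res := by
  intro ss
  induction ss with
  | nil => intro res p _ _ _; rfl
  | cons t ts ih =>
    intro res p hlen hpw hinv
    have hinv_t := hinv t (List.mem_cons_self)
    have hfind := aAdvance_find path t.1 p hlen hinv_t
    have hstep : aStep path (res, p) t = (bStep path res t, aAdvance path t.1 p) := by
      simp only [aStep, bStep, hfind]
      by_cases hp : aAdvance path t.1 p < path.length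
      · simp only [if_pos hp, if_neg (by omega : ¬ aAdvance path t.1 p ≥ path.length)]
        rw [Bool.and_comm]
      · simp only [if_neg hp, if_pos (by omega : aAdvance path t.1 p ≥ path.length),
          Bool.true_and, Bool.and_true]
    rw [List.foldl_cons, List.foldl_cons, hstep]
    refine ih (bStep path res t) (aAdvance path t.1 p) (aAdvance_le path t.1 p hlen)
      (List.Pairwise.of_cons hpw) ?_
    intro t' ht' k hk
    by_cases hkp : k < p
    · exact hinv t' (List.mem_cons_of_mem _ ht') k hkp
    · have h1 : (path.getD k (0, 0)).1 ≤ t.1 :=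
        aAdvance_skipped path t.1 p k (by omega) hk
      have h2 : t.1 ≤ t'.1 := (List.pairwise_cons.mp hpw).1 t' ht'
      omega

lemma pySetD_comm (res : List Int) (i j : Int) :
    PySem.List.pySetD (PySem.List.pySetD res i 1) j 1 =
      PySem.List.pySetD (PySem.List.pySetD res j 1) i 1 := by
  rcases h1 : PySem.List.pyIdx? res.length i with _ | ki <;>
  rcases h2 : PySem.List.pyIdx? res.length j with _ | kj <;>
  simp [PySem.List.pySetD, PySem.List.pySet?, h1, h2, List.length_set]
  by_cases hij : ki = kj
  · subst hij; rfl
  · exact List.set_comm 1 1 hij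

lemma bStep_comm (path : List (Int × Int)) (res : List Int) (a b : Int × Int × Int) :
    bStep path (bStep path res a) b = bStep path (bStep path res b) a := by
  simp only [bStep]
  split_ifs <;> first | rfl | exact pySetD_comm res a.2.2 b.2.2

-- ===== VERDICT (by name: the statement is the Claim_ definition above) =====
theorem answer_shoe_queries_spec : Claim_equal_answer_shoe_queries := by
  intro shoes path_data _ _
  unfold Spec_answer_shoe_queries answer_shoe_queries answer_shoe_queries_alt
  rw [loop_eq path_data (PySem.List.sorted shoes (fun t => t.1) false)
      (List.replicate shoes.length 0) 0 (Nat.zero_le _)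
      (PySem.List.sorted_pairwise shoes (fun t => t.1))
      (fun t _ k hk => absurd hk (Nat.not_lt_zero k))]
  exact (PySem.List.sorted_perm shoes (fun t => t.1) false).foldl_eq'
    (fun x _ y _ z => bStep_comm path_data z x y) _
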